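-- pv_equiv track=rewrite | github.com/santaK1aus/labworks | Python/alnalc.py | allpali
-- ===== SOURCE A (Python) =====
-- def allpali(s):
-- 	s1=set()
-- 	i=0
-- 	length=len(s)
-- 	while(i<length):
-- 		pa=s[i]
-- 		s1.add(pa)
-- 		j=1
-- 		while((i+j)<length and (i-j)>-1):
-- 			if s[i+j]!=s[i-j]:
-- 				break
-- 			pa=s[i-j]+pa+s[i+j]
-- 			s1.add(pa)
-- 			j+=1
-- 		j=0
-- 		pa=''
-- 		while((i+j+1)<length and (i-j)>-1):
-- 			if s[i-j]!=s[i+1+j]: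
-- 				break
-- 			pa=s[i-j]+pa+s[i+1+j]
-- 			s1.add(pa)
-- 			j+=1
-- 		i+=1
-- 	lw=list(sorted(s1))
-- 	rs=''.join(lw)
-- 	return rs
-- ===== SOURCE B (Python) =====
-- def allpali(s):
--     pals = set()
--     n = len(s)
--     for l in range(n):
--         for r in range(l + 1, n + 1):
--             t = s[l:r]
--             if t == t[::-1]:
--                 pals.add(t)
--     return ''.join(sorted(pals))
-- ===== Notes on version B (the rewrite author's own statement) =====
-- stated objective: simpler
-- what changed: A expands palindromes around each odd/even centre with two hand-rolled while-loops that grow the palindrome string incrementally; B simply scans every substring s[l:r] once and keeps those equal to their reversal, then sorts and joins the set.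
import Mathlib
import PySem

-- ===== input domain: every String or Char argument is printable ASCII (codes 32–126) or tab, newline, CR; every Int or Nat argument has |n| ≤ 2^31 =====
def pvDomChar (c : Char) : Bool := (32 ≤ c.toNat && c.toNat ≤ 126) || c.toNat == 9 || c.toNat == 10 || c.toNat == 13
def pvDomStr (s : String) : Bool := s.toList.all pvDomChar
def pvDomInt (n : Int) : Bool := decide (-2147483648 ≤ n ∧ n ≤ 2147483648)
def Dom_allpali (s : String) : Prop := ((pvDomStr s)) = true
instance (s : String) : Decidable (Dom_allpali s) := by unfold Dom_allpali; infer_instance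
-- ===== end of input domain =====

-- B replaces A's two hand-rolled centre-expansion while-loops by a plain scan over all
-- substrings with a reversal palindrome test: simpler, not faster.

-- ===== PORT A =====
-- inner odd-length while loop: while (i+j)<length and (i-j)>-1: … (fuel = length suffices;
-- chars are read with getD, always in range under the loop guard)
def allpaliOdd (cs : List Char) (n i : Nat) :
    Nat → List Char → PySem.Set (List Char) → Nat → PySem.Set (List Char)
  | _, _, s1, 0 => s1
  | j, pa, s1, fuel+1 =>
    if i + j < n ∧ j ≤ i then           -- (i+j)<length and (i-j)>-1
      if cs.getD (i+j) 'a' ≠ cs.getD (i-j) 'a' then s1   -- break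
      else
        let pa' := cs.getD (i-j) 'a' :: (pa ++ [cs.getD (i+j) 'a'])  -- pa = s[i-j]+pa+s[i+j]
        allpaliOdd cs n i (j+1) pa' (PySem.Set.add s1 pa') fuel
    else s1

-- inner even-length while loop: while (i+j+1)<length and (i-j)>-1: …
def allpaliEven (cs : List Char) (n i : Nat) :
    Nat → List Char → PySem.Set (List Char) → Nat → PySem.Set (List Char)
  | _, _, s1, 0 => s1
  | j, pa, s1, fuel+1 =>
    if i + j + 1 < n ∧ j ≤ i then       -- (i+j+1)<length and (i-j)>-1
      if cs.getD (i-j) 'a' ≠ cs.getD (i+1+j) 'a' then s1  -- break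
      else
        let pa' := cs.getD (i-j) 'a' :: (pa ++ [cs.getD (i+1+j) 'a'])
        allpaliEven cs n i (j+1) pa' (PySem.Set.add s1 pa') fuel
    else s1

-- one iteration of the outer while loop over i
def allpaliStep (cs : List Char) (n : Nat) (s1 : PySem.Set (List Char)) (i : Nat) :
    PySem.Set (List Char) :=
  let pa := [cs.getD i 'a']                 -- pa = s[i]
  let s1 := PySem.Set.add s1 pa             -- s1.add(pa)
  let s1 := allpaliOdd cs n i 1 pa s1 n     -- j = 1
  allpaliEven cs n i 0 [] s1 n              -- j = 0, pa = ''

def allpaliSet (cs : List Char) : PySem.Set (List Char) :=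
  (List.range cs.length).foldl (allpaliStep cs cs.length) PySem.Set.empty

-- lw = list(sorted(s1)); rs = ''.join(lw)  (Python's string order = lexicographic on chars)
def allpali (s : String) : String :=
  String.ofList ((PySem.List.sorted (allpaliSet s.toList) (fun x => x) false).flatten)

-- ===== PORT B =====
-- for r in range(l+1, n+1): t = s[l:r]; if t == t[::-1]: pals.add(t)
def allpaliAltStep (cs : List Char) (n : Nat) (acc : PySem.Set (List Char)) (l : Nat) :
    PySem.Set (List Char) :=
  (List.range' (l+1) (n - l)).foldl (fun acc (r : Nat) =>
    let t := PySem.List.slice cs (some (l : Int)) (some (r : Int))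
    if t = t.reverse then PySem.Set.add acc t else acc) acc   -- t[::-1] = t.reverse

def allpaliAltSet (cs : List Char) : PySem.Set (List Char) :=
  (List.range cs.length).foldl (allpaliAltStep cs cs.length) PySem.Set.empty

-- return ''.join(sorted(pals))
def allpali_alt (s : String) : String :=
  String.ofList ((PySem.List.sorted (allpaliAltSet s.toList) (fun x => x) false).flatten)

-- ===== PRECONDITION & SPEC =====
def Spec_allpali (s : String) (out : String) : Prop := out = allpali_alt s
instance (s : String) (out : String) : Decidable (Spec_allpali s out) := by unfold Spec_allpali; infer_instance

-- ===== CLAIM (what is proved, stated in full; the proofs are below) =====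
def Claim_equal_allpali : Prop := ∀ (s : String), Dom_allpali s → Spec_allpali s (allpali s)

-- ===== LEMMAS AND PROOFS =====

-- the substring s[l:r] as a list of chars
def pvSub (cs : List Char) (l r : Nat) : List Char := (cs.drop l).take (r - l)

-- "t is a (nonempty) palindromic substring of cs"
def pvSubPal (cs : List Char) (t : List Char) : Prop :=
  ∃ l r : Nat, l < r ∧ r ≤ cs.length ∧ t = pvSub cs l r ∧ t.reverse = t

-- everything A's iteration i can put into the set
def pvPalAt (cs : List Char) (i : Nat) (t : List Char) : Prop :=
  t = [cs.getD i 'a']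
  ∨ (∃ k, 1 ≤ k ∧ i + k < cs.length ∧ k ≤ i ∧
      (∀ m, 1 ≤ m → m ≤ k → cs.getD (i+m) 'a' = cs.getD (i-m) 'a') ∧
      t = pvSub cs (i-k) (i+k+1))
  ∨ (∃ k, i + k + 1 < cs.length ∧ k ≤ i ∧
      (∀ m, m ≤ k → cs.getD (i-m) 'a' = cs.getD (i+1+m) 'a') ∧
      t = pvSub cs (i-k) (i+k+2))

lemma pvSub_length (cs : List Char) (l r : Nat) (h2 : r ≤ cs.length) :
    (pvSub cs l r).length = r - l := by
  simp [pvSub]; omega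

lemma pvSub_getD (cs : List Char) (l r p : Nat) (hp : p < r - l) :
    (pvSub cs l r).getD p 'a' = cs.getD (l + p) 'a' := by
  simp [pvSub, List.getD_eq_getElem?_getD, List.getElem?_drop, hp]

lemma pvSub_singleton (cs : List Char) (i : Nat) (hi : i < cs.length) :
    pvSub cs i (i+1) = [cs.getD i 'a'] := by
  have h : i + 1 - i = 1 := by omega
  simp [pvSub, h, List.take_one, List.head?_drop, List.getD_eq_getElem?_getD, hi]

lemma pvSub_snoc (cs : List Char) (l r : Nat) (hl : l ≤ r) (hr : r < cs.length) :
    pvSub cs l r ++ [cs.getD r 'a'] = pvSub cs l (r+1) := by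
  have h : r + 1 - l = (r - l) + 1 := by omega
  rw [pvSub, pvSub, h, List.take_add_one]
  have : (cs.drop l)[r-l]? = some (cs.getD r 'a') := by
    rw [List.getElem?_drop]
    have h2 : l + (r - l) = r := by omega
    rw [h2, List.getElem?_eq_getElem hr, List.getD_eq_getElem _ _ hr]
  simp [this]

lemma pvSub_cons (cs : List Char) (l r : Nat) (hl : l < r) (hr : r ≤ cs.length) :
    cs.getD l 'a' :: pvSub cs (l+1) r = pvSub cs l r := by
  have hlen : l < cs.length := by omega
  rw [pvSub, pvSub, List.drop_eq_getElem_cons hlen]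
  have h : r - l = (r - (l+1)) + 1 := by omega
  rw [h, List.take_succ_cons, List.getD_eq_getElem _ _ hlen]

lemma pvPal_iff (t : List Char) :
    t.reverse = t ↔ ∀ p, p < t.length → t.getD p 'a' = t.getD (t.length - 1 - p) 'a' := by
  constructor
  · intro h p hp
    rw [List.getD_eq_getElem _ _ hp, List.getD_eq_getElem _ _ (by omega)]
    have h1 := List.getElem_reverse (l := t) (i := p) (by simpa using hp)
    rw [← h1]
    simp only [h]
  · intro h
    apply List.ext_getElem (by simp)
    intro p h1 h2
    rw [List.getElem_reverse]
    have hh := h p (by simpa using h1)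
    rw [List.getD_eq_getElem _ _ (by simpa using h1), List.getD_eq_getElem _ _ (by omega)] at hh
    exact hh.symm

lemma pvOdd_bridge (cs : List Char) (i k : Nat) (hk : k ≤ i) (hn : i + k < cs.length) :
    (pvSub cs (i-k) (i+k+1)).reverse = pvSub cs (i-k) (i+k+1) ↔
      ∀ m, m ≤ k → cs.getD (i+m) 'a' = cs.getD (i-m) 'a' := by
  have hlen : (pvSub cs (i-k) (i+k+1)).length = 2*k+1 := by
    rw [pvSub_length _ _ _ (by omega)]; omega
  rw [pvPal_iff, hlen]
  constructor
  · intro h m hm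
    have hh := h (k - m) (by omega)
    rw [pvSub_getD _ _ _ _ (by omega), pvSub_getD _ _ _ _ (by omega)] at hh
    have e1 : i - k + (k - m) = i - m := by omega
    have e2 : i - k + (2*k+1-1-(k-m)) = i + m := by omega
    rw [e1, e2] at hh
    exact hh.symm
  · intro h p hp
    rw [pvSub_getD _ _ _ _ (by omega), pvSub_getD _ _ _ _ (by omega)]
    by_cases hpk : p ≤ k
    · have hh := h (k - p) (by omega)
      have e1 : i + (k - p) = i - k + (2*k+1-1-p) := by omega
      have e2 : i - (k - p) = i - k + p := by omega
      rw [e1, e2] at hh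
      exact hh.symm
    · have hh := h (p - k) (by omega)
      have e1 : i + (p - k) = i - k + p := by omega
      have e2 : i - (p - k) = i - k + (2*k+1-1-p) := by omega
      rw [e1, e2] at hh
      exact hh

lemma pvEven_bridge (cs : List Char) (i k : Nat) (hk : k ≤ i) (hn : i + k + 1 < cs.length) :
    (pvSub cs (i-k) (i+k+2)).reverse = pvSub cs (i-k) (i+k+2) ↔
      ∀ m, m ≤ k → cs.getD (i-m) 'a' = cs.getD (i+1+m) 'a' := by
  have hlen : (pvSub cs (i-k) (i+k+2)).length = 2*k+2 := by
    rw [pvSub_length _ _ _ (by omega)]; omega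
  rw [pvPal_iff, hlen]
  constructor
  · intro h m hm
    have hh := h (k - m) (by omega)
    rw [pvSub_getD _ _ _ _ (by omega), pvSub_getD _ _ _ _ (by omega)] at hh
    have e1 : i - k + (k - m) = i - m := by omega
    have e2 : i - k + (2*k+2-1-(k-m)) = i + 1 + m := by omega
    rw [e1, e2] at hh
    exact hh
  · intro h p hp
    rw [pvSub_getD _ _ _ _ (by omega), pvSub_getD _ _ _ _ (by omega)]
    by_cases hpk : p ≤ k
    · have hh := h (k - p) (by omega)
      have e1 : i - (k - p) = i - k + p := by omega
      have e2 : i + 1 + (k - p) = i - k + (2*k+2-1-p) := by omega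
      rw [e1, e2] at hh
      exact hh
    · have hh := h (p - k - 1) (by omega)
      have e1 : i - (p - k - 1) = i - k + (2*k+2-1-p) := by omega
      have e2 : i + 1 + (p - k - 1) = i - k + p := by omega
      rw [e1, e2] at hh
      exact hh.symm

lemma pv_mem_foldl {α β : Type} (G : List β → α → List β) (P : α → β → Prop)
    (l : List α) (hG : ∀ s x t, x ∈ l → (t ∈ G s x ↔ t ∈ s ∨ P x t)) :
    ∀ (s : List β) (t : β), t ∈ l.foldl G s ↔ t ∈ s ∨ ∃ x ∈ l, P x t := by
  induction l with
  | nil => simp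
  | cons a l ih =>
    intro s t
    rw [List.foldl_cons, ih (fun s x t hx => hG s x t (List.mem_cons_of_mem a hx)),
      hG s a t (List.mem_cons_self)]
    simp only [List.mem_cons]
    constructor
    · rintro ((h | h) | ⟨x, hx, hp⟩)
      · exact Or.inl h
      · exact Or.inr ⟨a, Or.inl rfl, h⟩
      · exact Or.inr ⟨x, Or.inr hx, hp⟩
    · rintro (h | ⟨x, (rfl | hx), hp⟩)
      · exact Or.inl (Or.inl h)
      · exact Or.inl (Or.inr hp)
      · exact Or.inr ⟨x, hx, hp⟩

lemma pv_nodup_foldl {α β : Type} (G : List β → α → List β)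
    (l : List α) (hG : ∀ s x, x ∈ l → s.Nodup → (G s x).Nodup) :
    ∀ s : List β, s.Nodup → (l.foldl G s).Nodup := by
  induction l with
  | nil => intro s hs; simpa using hs
  | cons a l ih =>
    intro s hs
    rw [List.foldl_cons]
    exact ih (fun s x hx => hG s x (List.mem_cons_of_mem a hx)) _
      (hG s a List.mem_cons_self hs)

lemma pv_mem_odd (cs : List Char) (i : Nat) :
    ∀ (fuel j : Nat) (pa : List Char) (s1 : List (List Char)) (t : List Char),
      1 ≤ j → cs.length ≤ fuel + j → pa = pvSub cs (i - (j-1)) (i + j) →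
      (t ∈ allpaliOdd cs cs.length i j pa s1 fuel ↔
        t ∈ s1 ∨ ∃ k, j ≤ k ∧ i + k < cs.length ∧ k ≤ i ∧
          (∀ m, j ≤ m → m ≤ k → cs.getD (i+m) 'a' = cs.getD (i-m) 'a') ∧
          t = pvSub cs (i-k) (i+k+1)) := by
  intro fuel
  induction fuel with
  | zero =>
    intro j pa s1 t hj hfuel hpa
    simp only [allpaliOdd]
    constructor
    · exact Or.inl
    · rintro (h | ⟨k, hk1, hk2, _, _, _⟩)
      · exact h
      · omega
  | succ fuel ih =>
    intro j pa s1 t hj hfuel hpa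
    simp only [allpaliOdd]
    by_cases hcond : i + j < cs.length ∧ j ≤ i
    · rw [if_pos hcond]
      by_cases hne : cs.getD (i+j) 'a' ≠ cs.getD (i-j) 'a'
      · rw [if_pos hne]
        constructor
        · exact Or.inl
        · rintro (h | ⟨k, hk1, hk2, hk3, hm, ht⟩)
          · exact h
          · exact absurd (hm j le_rfl hk1) hne
      · rw [if_neg hne]
        rw [ne_eq, not_not] at hne
        have hpa' : cs.getD (i-j) 'a' :: (pa ++ [cs.getD (i+j) 'a'])
            = pvSub cs (i-j) (i+j+1) := by
          rw [hpa]
          have h1 : i - (j-1) = (i-j)+1 := by omega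
          rw [h1, pvSub_snoc cs ((i-j)+1) (i+j) (by omega) hcond.1,
            pvSub_cons cs (i-j) (i+j+1) (by omega) (by omega)]
        rw [ih (j+1) _ _ t (by omega) (by omega)
          (by simp only [Nat.add_sub_cancel]; exact hpa')]
        rw [PySem.Set.mem_add]
        constructor
        · rintro ((h | h) | ⟨k, hk1, hk2, hk3, hm, ht⟩)
          · exact Or.inl h
          · refine Or.inr ⟨j, le_rfl, hcond.1, hcond.2, ?_, by rw [h, hpa']⟩
            intro m h1 h2
            have : m = j := by omega
            subst this; exact hne
          · refine Or.inr ⟨k, by omega, hk2, hk3, ?_, ht⟩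
            intro m h1 h2
            by_cases hmj : m = j
            · subst hmj; exact hne
            · exact hm m (by omega) h2
        · rintro (h | ⟨k, hk1, hk2, hk3, hm, ht⟩)
          · exact Or.inl (Or.inl h)
          · by_cases hkj : k = j
            · subst hkj
              exact Or.inl (Or.inr (by rw [ht, hpa']))
            · refine Or.inr ⟨k, by omega, hk2, hk3, fun m h1 h2 => hm m (by omega) h2, ht⟩
    · rw [if_neg hcond]
      constructor
      · exact Or.inl
      · rintro (h | ⟨k, hk1, hk2, hk3, _, _⟩)
        · exact h
        · exact absurd ⟨by omega, by omega⟩ hcond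

lemma pv_mem_even (cs : List Char) (i : Nat) :
    ∀ (fuel j : Nat) (pa : List Char) (s1 : List (List Char)) (t : List Char),
      cs.length ≤ fuel + j + 1 → pa = pvSub cs (i+1-j) (i+1+j) →
      (t ∈ allpaliEven cs cs.length i j pa s1 fuel ↔
        t ∈ s1 ∨ ∃ k, j ≤ k ∧ i + k + 1 < cs.length ∧ k ≤ i ∧
          (∀ m, j ≤ m → m ≤ k → cs.getD (i-m) 'a' = cs.getD (i+1+m) 'a') ∧
          t = pvSub cs (i-k) (i+k+2)) := by
  intro fuel
  induction fuel with
  | zero =>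
    intro j pa s1 t hfuel hpa
    simp only [allpaliEven]
    constructor
    · exact Or.inl
    · rintro (h | ⟨k, hk1, hk2, _, _, _⟩)
      · exact h
      · omega
  | succ fuel ih =>
    intro j pa s1 t hfuel hpa
    simp only [allpaliEven]
    by_cases hcond : i + j + 1 < cs.length ∧ j ≤ i
    · rw [if_pos hcond]
      by_cases hne : cs.getD (i-j) 'a' ≠ cs.getD (i+1+j) 'a'
      · rw [if_pos hne]
        constructor
        · exact Or.inl
        · rintro (h | ⟨k, hk1, hk2, hk3, hm, ht⟩)
          · exact h
          · exact absurd (hm j le_rfl hk1) hne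
      · rw [if_neg hne]
        rw [ne_eq, not_not] at hne
        have hpa' : cs.getD (i-j) 'a' :: (pa ++ [cs.getD (i+1+j) 'a'])
            = pvSub cs (i+1-(j+1)) (i+1+(j+1)) := by
          have e1 : i+1-(j+1) = i-j := by omega
          have e2 : i+1+(j+1) = (i+1+j)+1 := by omega
          rw [e1, e2, hpa]
          rw [pvSub_snoc cs (i+1-j) (i+1+j) (by omega) (by omega)]
          have e3 : i+1-j = (i-j)+1 := by omega
          rw [e3, pvSub_cons cs (i-j) (i+1+j+1) (by omega) (by omega)]
        rw [ih (j+1) _ _ t (by omega) hpa']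
        rw [PySem.Set.mem_add]
        constructor
        · rintro ((h | h) | ⟨k, hk1, hk2, hk3, hm, ht⟩)
          · exact Or.inl h
          · refine Or.inr ⟨j, le_rfl, hcond.1, hcond.2, ?_, ?_⟩
            · intro m h1 h2
              have : m = j := by omega
              subst this; exact hne
            · rw [h, hpa']
              congr 1 <;> omega
          · refine Or.inr ⟨k, by omega, hk2, hk3, ?_, ht⟩
            intro m h1 h2
            by_cases hmj : m = j
            · subst hmj; exact hne
            · exact hm m (by omega) h2
        · rintro (h | ⟨k, hk1, hk2, hk3, hm, ht⟩)
          · exact Or.inl (Or.inl h)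
          · by_cases hkj : k = j
            · subst hkj
              refine Or.inl (Or.inr ?_)
              rw [ht, hpa']
              congr 1 <;> omega
            · refine Or.inr ⟨k, by omega, hk2, hk3, fun m h1 h2 => hm m (by omega) h2, ht⟩
    · rw [if_neg hcond]
      constructor
      · exact Or.inl
      · rintro (h | ⟨k, hk1, hk2, hk3, _, _⟩)
        · exact h
        · exact absurd ⟨by omega, by omega⟩ hcond

lemma pv_mem_step (cs : List Char) (s1 : List (List Char)) (i : Nat) (hi : i < cs.length)
    (t : List Char) :
    t ∈ allpaliStep cs cs.length s1 i ↔ t ∈ s1 ∨ pvPalAt cs i t := by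
  unfold allpaliStep
  rw [pv_mem_even cs i cs.length 0 _ _ t (by omega) (by simp [pvSub])]
  rw [pv_mem_odd cs i cs.length 1 _ _ t le_rfl (by omega)
    (by simpa using (pvSub_singleton cs i hi).symm)]
  rw [PySem.Set.mem_add]
  unfold pvPalAt
  constructor
  · rintro (((h | h) | h) | ⟨k, hk1, hk2, hk3, hm, ht⟩)
    · exact Or.inl h
    · exact Or.inr (Or.inl h)
    · exact Or.inr (Or.inr (Or.inl h))
    · exact Or.inr (Or.inr (Or.inr ⟨k, hk2, hk3, fun m hmk => hm m (Nat.zero_le m) hmk, ht⟩))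
  · rintro (h | (h | (h | ⟨k, hk1, hk2, hm, ht⟩)))
    · exact Or.inl (Or.inl (Or.inl h))
    · exact Or.inl (Or.inl (Or.inr h))
    · exact Or.inl (Or.inr h)
    · exact Or.inr ⟨k, Nat.zero_le k, hk1, hk2, fun m _ hmk => hm m hmk, ht⟩

lemma pv_mem_A (cs : List Char) (t : List Char) :
    t ∈ allpaliSet cs ↔ ∃ i, i < cs.length ∧ pvPalAt cs i t := by
  unfold allpaliSet
  rw [pv_mem_foldl _ (fun i t => pvPalAt cs i t) _
    (fun s x t hx => pv_mem_step cs s x (List.mem_range.mp hx) t)]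
  simp [PySem.Set.empty, List.mem_range]

lemma pv_mem_B (cs : List Char) (t : List Char) :
    t ∈ allpaliAltSet cs ↔ pvSubPal cs t := by
  unfold allpaliAltSet
  rw [pv_mem_foldl _ (fun l t => ∃ r ∈ List.range' (l+1) (cs.length - l),
      t = pvSub cs l r ∧ t.reverse = t) _ ?_]
  · simp only [PySem.Set.empty, List.not_mem_nil, false_or, List.mem_range, List.mem_range'_1]
    unfold pvSubPal
    constructor
    · rintro ⟨l, hl, r, ⟨hr1, hr2⟩, ht, hpal⟩
      exact ⟨l, r, by omega, by omega, ht, hpal⟩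
    · rintro ⟨l, r, hlr, hrn, ht, hpal⟩
      exact ⟨l, by omega, r, ⟨by omega, by omega⟩, ht, hpal⟩
  · intro acc l t _
    unfold allpaliAltStep
    rw [pv_mem_foldl _ (fun r t => t = pvSub cs l r ∧ t.reverse = t) _ ?_]
    intro acc' r t _
    simp only [PySem.List.slice_natCast]
    have hsub : (cs.drop l).take (r - l) = pvSub cs l r := rfl
    rw [hsub]
    split_ifs with hc
    · rw [PySem.Set.mem_add]
      constructor
      · rintro (h | h)
        · exact Or.inl h
        · exact Or.inr ⟨h, by rw [h]; exact hc.symm⟩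
      · rintro (h | ⟨h1, h2⟩)
        · exact Or.inl h
        · exact Or.inr h1
    · constructor
      · exact Or.inl
      · rintro (h | ⟨h1, h2⟩)
        · exact h
        · exact (hc (by rw [← h1]; exact h2.symm)).elim

lemma pv_palAt_iff (cs : List Char) (t : List Char) :
    (∃ i, i < cs.length ∧ pvPalAt cs i t) ↔ pvSubPal cs t := by
  constructor
  · rintro ⟨i, hi, (ht | ⟨k, hk1, hk2, hk3, hm, ht⟩ | ⟨k, hk2, hk3, hm, ht⟩)⟩
    · refine ⟨i, i+1, by omega, by omega, by rw [ht, pvSub_singleton cs i hi], by rw [ht]; simp⟩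
    · refine ⟨i-k, i+k+1, by omega, by omega, ht, ?_⟩
      rw [ht]
      refine (pvOdd_bridge cs i k hk3 hk2).mpr ?_
      intro m hmk
      rcases Nat.eq_zero_or_pos m with hm0 | hm0
      · subst hm0; simp
      · exact hm m hm0 hmk
    · refine ⟨i-k, i+k+2, by omega, by omega, ht, ?_⟩
      rw [ht]
      exact (pvEven_bridge cs i k hk3 hk2).mpr hm
  · rintro ⟨l, r, hlr, hrn, ht, hpal⟩
    rcases Nat.even_or_odd (r - l) with ⟨k, hk⟩ | ⟨k, hk⟩
    · -- even length r - l = k + k, k ≥ 1; centre i = l + (k-1)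
      have hk1 : 1 ≤ k := by omega
      refine ⟨l + (k-1), by omega, Or.inr (Or.inr ⟨k-1, by omega, by omega, ?_, ?_⟩)⟩
      · refine (pvEven_bridge cs (l + (k-1)) (k-1) (by omega) (by omega)).mp ?_
        have e : pvSub cs (l + (k-1) - (k-1)) (l + (k-1) + (k-1) + 2) = pvSub cs l r := by
          congr 1 <;> omega
        rw [e, ← ht]; exact hpal
      · rw [ht]; congr 1 <;> omega
    · -- odd length r - l = 2k + 1; centre i = l + k
      rcases Nat.eq_zero_or_pos k with hk0 | hk0
      · subst hk0
        refine ⟨l, by omega, Or.inl ?_⟩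
        rw [ht]
        have e : pvSub cs l r = pvSub cs l (l+1) := by congr 1; omega
        rw [e, pvSub_singleton cs l (by omega)]
      · refine ⟨l + k, by omega, Or.inr (Or.inl ⟨k, hk0, by omega, by omega, ?_, ?_⟩)⟩
        · intro m _ hmk
          refine (pvOdd_bridge cs (l+k) k (by omega) (by omega)).mp ?_ m hmk
          have e : pvSub cs (l + k - k) (l + k + k + 1) = pvSub cs l r := by
            congr 1 <;> omega
          rw [e, ← ht]; exact hpal
        · rw [ht]; congr 1 <;> omega

lemma pv_nodup_odd (cs : List Char) (n i : Nat) :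
    ∀ (fuel j : Nat) (pa : List Char) (s1 : List (List Char)), s1.Nodup →
      (allpaliOdd cs n i j pa s1 fuel).Nodup := by
  intro fuel
  induction fuel with
  | zero => intro j pa s1 hs; simpa [allpaliOdd] using hs
  | succ fuel ih =>
    intro j pa s1 hs
    simp only [allpaliOdd]
    split_ifs with h1 h2
    · exact hs
    · exact ih _ _ _ (PySem.Set.nodup_add _ _ hs)
    · exact hs

lemma pv_nodup_even (cs : List Char) (n i : Nat) :
    ∀ (fuel j : Nat) (pa : List Char) (s1 : List (List Char)), s1.Nodup →
      (allpaliEven cs n i j pa s1 fuel).Nodup := by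
  intro fuel
  induction fuel with
  | zero => intro j pa s1 hs; simpa [allpaliEven] using hs
  | succ fuel ih =>
    intro j pa s1 hs
    simp only [allpaliEven]
    split_ifs with h1 h2
    · exact hs
    · exact ih _ _ _ (PySem.Set.nodup_add _ _ hs)
    · exact hs

lemma pv_nodup_A (cs : List Char) : (allpaliSet cs).Nodup := by
  unfold allpaliSet
  refine pv_nodup_foldl _ _ (fun s x _ hs => ?_) _ List.nodup_nil
  unfold allpaliStep
  exact pv_nodup_even cs cs.length x _ _ _ _
    (pv_nodup_odd cs cs.length x _ _ _ _ (PySem.Set.nodup_add _ _ hs))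

lemma pv_nodup_B (cs : List Char) : (allpaliAltSet cs).Nodup := by
  unfold allpaliAltSet
  refine pv_nodup_foldl _ _ (fun s x _ hs => ?_) _ List.nodup_nil
  unfold allpaliAltStep
  refine pv_nodup_foldl _ _ (fun s' r _ hs' => ?_) _ hs
  dsimp only
  split_ifs with hc
  · exact PySem.Set.nodup_add _ _ hs'
  · exact hs'

lemma pv_perm (cs : List Char) : (allpaliSet cs).Perm (allpaliAltSet cs) := by
  rw [List.perm_ext_iff_of_nodup (pv_nodup_A cs) (pv_nodup_B cs)]
  intro t
  rw [pv_mem_A, pv_mem_B, pv_palAt_iff]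

lemma pv_sorted_eq (cs : List Char) :
    PySem.List.sorted (allpaliSet cs) (fun x => x) false
      = PySem.List.sorted (allpaliAltSet cs) (fun x => x) false := by
  have h := PySem.List.sorted_eq_sorted_of_perm (allpaliSet cs) (allpaliAltSet cs)
    (fun x => x) (fun a b hab => hab) (pv_perm cs)
  calc PySem.List.sorted (allpaliSet cs) (fun x => x) false
      = @PySem.List.sorted (List Char) (List Char) List.instLinearOrder.toLT
          LinearOrder.toDecidableLT (allpaliSet cs) (fun x => x) false := by congr 1
    _ = @PySem.List.sorted (List Char) (List Char) List.instLinearOrder.toLT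
          LinearOrder.toDecidableLT (allpaliAltSet cs) (fun x => x) false := h
    _ = PySem.List.sorted (allpaliAltSet cs) (fun x => x) false := by congr 1

-- ===== VERDICT (by name: the statement is the Claim_ definition above) =====
theorem allpali_spec : Claim_equal_allpali := by
  intro s _
  unfold Spec_allpali allpali allpali_alt
  rw [pv_sorted_eq]
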